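-- pv_equiv track=rewrite | github.com/osdi261855/Pripaxos | minimum.py | calculate_node_value
-- ===== SOURCE A (Python) =====
-- def calculate_node_value(dist_matrix, node_idx, priorities):
--     """
--     计算单个节点的值
--
--     参数:
--     - dist_matrix: 5×5距离矩阵
--     - node_idx: 当前节点索引
--     - priorities: 优先级数组，priorities[i]表示节点i的优先级（0是最高优先级）
--
--     返回:
--     - 该节点的计算值（距离的平均值）
--     """
--     n = len(dist_matrix)
--     current_priority = priorities[node_idx]
--
--     # 找出优先级高于当前节点的节点（优先级值更小）
--     higher_priority_nodes = []
--     lower_priority_nodes = []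
--
--     for i in range(n):
--         if i != node_idx:
--             if priorities[i] < current_priority:  # 优先级值更小表示优先级更高
--                 higher_priority_nodes.append((i, dist_matrix[node_idx][i]))
--             else:
--                 lower_priority_nodes.append((i, dist_matrix[node_idx][i]))
--
--     # 需要选取的节点数量
--     required_count = 2
--
--     # 选中的距离列表
--     selected_distances = []
--
--     # 首先添加所有优先级更高的节点
--     for node_idx_high, dist in higher_priority_nodes:
--         selected_distances.append(dist)
--
--     # 如果优先级高的节点数量不足2个，从优先级低的节点中补充
--     if len(selected_distances) < required_count:
--         # 按距离排序优先级低的节点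
--         lower_priority_nodes.sort(key=lambda x: x[1])
--
--         # 补充需要的节点数量
--         needed = required_count - len(selected_distances)
--         for i in range(min(needed, len(lower_priority_nodes))):
--             selected_distances.append(lower_priority_nodes[i][1])
--
--     # 返回距离的平均值
--     if selected_distances:
--         return max(selected_distances)
--     else:
--         return 0
-- ===== SOURCE B (Python) =====
-- def calculate_node_value(dist_matrix, node_idx, priorities):
--     """One-pass re-implementation: track the running max of the higher-priority
--     distances and the two smallest lower-priority distances; no lists, no sort."""
--     p = priorities[node_idx]
--     cnt = 0          # how many higher-priority nodes
--     best = None      # max distance among higher-priority nodes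
--     m1 = None        # smallest lower-priority distance
--     m2 = None        # second smallest lower-priority distance
--     for i in range(len(dist_matrix)):
--         if i == node_idx:
--             continue
--         d = dist_matrix[node_idx][i]
--         if priorities[i] < p:
--             cnt += 1
--             if best is None or d > best:
--                 best = d
--         else:
--             if m1 is None or d < m1:
--                 m1, m2 = d, m1
--             elif m2 is None or d < m2:
--                 m2 = d
--     if cnt >= 2:
--         return best
--     if cnt == 1:
--         return best if m1 is None else max(best, m1)
--     if m2 is not None:
--         return m2
--     if m1 is not None:
--         return m1
--     return 0
-- ===== Notes on version B (the rewrite author's own statement) =====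
-- stated objective: alternative
-- what changed: Replaces A's partition-into-two-lists, sort-of-the-lower-list and supplement loop by a single pass that maintains only the running max of higher-priority distances and the two smallest lower-priority distances.
import Mathlib
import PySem

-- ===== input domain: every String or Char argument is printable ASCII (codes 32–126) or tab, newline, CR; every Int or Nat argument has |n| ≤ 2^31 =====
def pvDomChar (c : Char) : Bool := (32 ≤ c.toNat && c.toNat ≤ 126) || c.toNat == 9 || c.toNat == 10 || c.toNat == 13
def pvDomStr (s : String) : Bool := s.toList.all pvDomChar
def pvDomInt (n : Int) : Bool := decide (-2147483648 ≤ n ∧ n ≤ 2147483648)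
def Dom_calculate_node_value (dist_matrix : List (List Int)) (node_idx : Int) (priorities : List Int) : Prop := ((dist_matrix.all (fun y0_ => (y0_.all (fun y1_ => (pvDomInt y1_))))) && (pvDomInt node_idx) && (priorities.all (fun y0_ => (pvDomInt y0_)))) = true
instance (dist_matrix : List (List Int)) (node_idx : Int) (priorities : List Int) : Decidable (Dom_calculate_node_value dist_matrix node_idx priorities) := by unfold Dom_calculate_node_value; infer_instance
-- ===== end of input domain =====

-- B replaces A's partition-into-lists + sort + supplement loop by a single pass that keeps
-- only the running max of the higher-priority distances and the two smallest lower-priority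
-- distances (objective: alternative / lighter bookkeeping, no intermediate lists and no sort).

-- ===== PORT A =====
-- loop body of A's partitioning 'for i in range(n)'
def pvStepA (dist_matrix : List (List Int)) (node_idx current : Int) (priorities : List Int)
    (s : List (Int × Int) × List (Int × Int)) (i : Int) : List (Int × Int) × List (Int × Int) :=
  if i ≠ node_idx then
    if PySem.List.pyGetD priorities i 0 < current then
      (s.1 ++ [(i, PySem.List.pyGetD (PySem.List.pyGetD dist_matrix node_idx []) i 0)], s.2)
    else
      (s.1, s.2 ++ [(i, PySem.List.pyGetD (PySem.List.pyGetD dist_matrix node_idx []) i 0)])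
  else s

def calculate_node_value (dist_matrix : List (List Int)) (node_idx : Int) (priorities : List Int) : Int :=
  let n : Int := PySem.List.len dist_matrix
  let current := PySem.List.pyGetD priorities node_idx 0
  let hl := (PySem.List.pyRange 0 n 1).foldl (pvStepA dist_matrix node_idx current priorities) ([], [])
  let selected := hl.1.foldl (fun acc (x : Int × Int) => acc ++ [x.2]) []
  let selected :=
    if (PySem.List.len selected) < 2 then
      let lows := PySem.List.sorted hl.2 (fun x => x.2)
      let needed : Int := 2 - PySem.List.len selected
      (PySem.List.pyRange 0 (min needed (PySem.List.len lows)) 1).foldl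
        (fun acc i => acc ++ [(PySem.List.pyGetD lows i ((0 : Int), (0 : Int))).2]) selected
    else selected
  match PySem.List.max? selected (fun x => x) with
  | some m => m
  | none => 0

-- ===== PORT B =====
-- the 'm1/m2' update chain of Source B's else-branch
def pvTwoMin (s : Option Int × Option Int) (d : Int) : Option Int × Option Int :=
  match s.1 with
  | none => (some d, none)
  | some a =>
    if d < a then (some d, some a)
    else
      match s.2 with
      | none => (some a, some d)
      | some b => if d < b then (some a, some d) else s

-- loop body of Source B: state (cnt, best, (m1, m2))
def pvStepB (dist_matrix : List (List Int)) (node_idx p : Int) (priorities : List Int)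
    (s : Int × Option Int × Option Int × Option Int) (i : Int) :
    Int × Option Int × Option Int × Option Int :=
  if i = node_idx then s
  else
    let d := PySem.List.pyGetD (PySem.List.pyGetD dist_matrix node_idx []) i 0
    if PySem.List.pyGetD priorities i 0 < p then
      (s.1 + 1,
       (match s.2.1 with
        | none => some d
        | some b => if d > b then some d else some b),
       s.2.2)
    else
      (s.1, s.2.1, pvTwoMin s.2.2 d)

def calculate_node_value_alt (dist_matrix : List (List Int)) (node_idx : Int) (priorities : List Int) : Int :=
  let p := PySem.List.pyGetD priorities node_idx 0
  let st := (PySem.List.pyRange 0 (PySem.List.len dist_matrix) 1).foldl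
      (pvStepB dist_matrix node_idx p priorities) (0, none, none, none)
  if st.1 ≥ 2 then st.2.1.getD 0
  else if st.1 = 1 then
    match st.2.2.1 with
    | none => st.2.1.getD 0
    | some m1 => max (st.2.1.getD 0) m1
  else
    match st.2.2.2 with
    | some m2 => m2
    | none =>
      match st.2.2.1 with
      | some m1 => m1
      | none => 0

-- ===== PRECONDITION & SPEC =====
-- Pre_ holds exactly when every index the Python code reads is in range
-- (priorities[node_idx]; and, for each loop index i ≠ node_idx, priorities[i] and
-- dist_matrix[node_idx][i]); outside it Python A raises IndexError (and so does B).
def Pre_calculate_node_value (dist_matrix : List (List Int)) (node_idx : Int) (priorities : List Int) : Prop :=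
  PySem.Raise.InRange priorities.length node_idx ∧
  (dist_matrix = [] ∨ PySem.Raise.InRange dist_matrix.length node_idx) ∧
  ∀ i ∈ PySem.List.pyRange 0 (PySem.List.len dist_matrix) 1, i = node_idx ∨
    (PySem.Raise.InRange priorities.length i ∧
     PySem.Raise.InRange (PySem.List.pyGetD dist_matrix node_idx []).length i)

instance (dist_matrix : List (List Int)) (node_idx : Int) (priorities : List Int) : Decidable (Pre_calculate_node_value dist_matrix node_idx priorities) := by unfold Pre_calculate_node_value; infer_instance

def pvWitness_calculate_node_value : List (List Int) × Int × List Int :=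
  ([[0, 1, 2], [1, 0, 3], [2, 3, 0]], 0, [1, 0, 2])

def Spec_calculate_node_value (dist_matrix : List (List Int)) (node_idx : Int) (priorities : List Int) (out : Int) : Prop := out = calculate_node_value_alt dist_matrix node_idx priorities
instance (dist_matrix : List (List Int)) (node_idx : Int) (priorities : List Int) (out : Int) : Decidable (Spec_calculate_node_value dist_matrix node_idx priorities out) := by unfold Spec_calculate_node_value; infer_instance

-- ===== CLAIM (what is proved, stated in full; the proofs are below) =====
def Claim_equal_calculate_node_value : Prop := ∀ (dist_matrix : List (List Int)) (node_idx : Int) (priorities : List Int), Dom_calculate_node_value dist_matrix node_idx priorities → Pre_calculate_node_value dist_matrix node_idx priorities → Spec_calculate_node_value dist_matrix node_idx priorities (calculate_node_value dist_matrix node_idx priorities)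

-- ===== LEMMAS AND PROOFS =====

-- abstraction of A's fold state into B's fold state
def pvEncode (HL : List (Int × Int) × List (Int × Int)) : Int × Option Int × Option Int × Option Int :=
  ((HL.1.length : Int),
   PySem.List.max? (HL.1.map (fun x => x.2)) (fun x => x),
   (HL.2.map (fun x => x.2)).foldl pvTwoMin (none, none))

theorem pvTwoMin_comm (s : Option Int × Option Int) (a b : Int) :
    pvTwoMin (pvTwoMin s a) b = pvTwoMin (pvTwoMin s b) a := by
  obtain ⟨m1, m2⟩ := s
  cases m1 <;> cases m2 <;>
    simp only [pvTwoMin] <;>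
    split_ifs <;>
    simp_all <;>
    first
      | rfl
      | omega
      | (split_ifs <;> simp_all <;> omega)

theorem pv_max?_append (xs : List Int) (d : Int) :
    PySem.List.max? (xs ++ [d]) (fun x => x) =
      (match PySem.List.max? xs (fun x => x) with
       | none => some d
       | some b => if d > b then some d else some b) := by
  cases h : PySem.List.max? xs (fun x => x) with
  | none =>
    simp only [PySem.List.max?] at h ⊢
    rw [List.foldl_append, h]
    rfl
  | some b =>
    simp only [PySem.List.max?] at h ⊢
    rw [List.foldl_append, h]
    simp only [List.foldl]

theorem pvStep_eq (dm : List (List Int)) (idx p : Int) (pr : List Int)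
    (s : List (Int × Int) × List (Int × Int)) (i : Int) :
    pvStepB dm idx p pr (pvEncode s) i = pvEncode (pvStepA dm idx p pr s i) := by
  obtain ⟨H, L⟩ := s
  by_cases hi : i = idx
  · simp [pvStepA, pvStepB, hi]
  · by_cases hp : PySem.List.pyGetD pr i 0 < p
    · simp only [pvStepA, pvStepB, hi, hp, if_true, if_false, ite_not]
      simp [pvEncode, pv_max?_append]
    · simp only [pvStepA, pvStepB, hi, hp, if_false, ite_not]
      simp [pvEncode, List.foldl_append]

theorem pvFold_eq (dm : List (List Int)) (idx p : Int) (pr : List Int)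
    (is : List Int) (s : List (Int × Int) × List (Int × Int)) :
    is.foldl (pvStepB dm idx p pr) (pvEncode s) = pvEncode (is.foldl (pvStepA dm idx p pr) s) := by
  induction is generalizing s with
  | nil => rfl
  | cons i t ih => simp only [List.foldl_cons, pvStep_eq, ih]

-- the two-smallest fold over a key-sorted list reads off the first two elements
theorem pvTwoMin_noop (x y : Int) (t : List Int) (h : ∀ e ∈ t, x ≤ e ∧ y ≤ e) :
    t.foldl pvTwoMin (some x, some y) = (some x, some y) := by
  induction t with
  | nil => rfl
  | cons e t ih =>
    have he := h e (by simp)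
    have : pvTwoMin (some x, some y) e = (some x, some y) := by
      simp only [pvTwoMin]
      rw [if_neg (by omega), if_neg (by omega)]
    simp only [List.foldl_cons, this]
    exact ih (fun e he' => h e (by simp [he']))

theorem pvTwoMin_sorted (ss : List Int) (hs : ss.Pairwise (· ≤ ·)) :
    ss.foldl pvTwoMin (none, none) =
      (match ss with
       | [] => (none, none)
       | [x] => (some x, none)
       | x :: y :: _ => (some x, some y)) := by
  match ss with
  | [] => rfl
  | [x] => rfl
  | x :: y :: t =>
    rw [List.pairwise_cons] at hs
    obtain ⟨hx0, hs'⟩ := hs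
    rw [List.pairwise_cons] at hs'
    obtain ⟨hy, _⟩ := hs'
    have hxy : x ≤ y := hx0 y (by simp)
    have hx : ∀ e ∈ t, x ≤ e := fun e he => hx0 e (by simp [he])
    simp only [List.foldl_cons]
    have h1 : pvTwoMin (none, none) x = (some x, none) := rfl
    have h2 : pvTwoMin (some x, none) y = (some x, some y) := by
      simp only [pvTwoMin]
      rw [if_neg (by omega)]
    rw [h1, h2, pvTwoMin_noop x y t (fun e he => ⟨hx e he, hy e he⟩)]

theorem pvTwoMin_eq_sorted (L : List (Int × Int)) :
    (L.map (fun x => x.2)).foldl pvTwoMin (none, none) =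
      ((PySem.List.sorted L (fun x => x.2)).map (fun x => x.2)).foldl pvTwoMin (none, none) := by
  haveI : RightCommutative pvTwoMin := ⟨pvTwoMin_comm⟩
  exact (List.Perm.map _ (PySem.List.sorted_perm L (fun x => x.2) false)).foldl_eq _ |>.symm

theorem pvTwoMin_sorted_fst (x : Int) (t : List Int) (hs : (x :: t).Pairwise (· ≤ ·)) :
    ((x :: t).foldl pvTwoMin (none, none)).1 = some x := by
  rw [pvTwoMin_sorted _ hs]
  cases t <;> rfl

theorem calculate_node_value_spec : Claim_equal_calculate_node_value := by
  intro dm idx pr _ _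
  unfold Spec_calculate_node_value calculate_node_value calculate_node_value_alt
  simp only [PySem.List.len_eq]
  rw [show ((0 : Int), (none : Option Int), (none : Option Int), (none : Option Int)) = pvEncode ([], []) from rfl,
      pvFold_eq]
  generalize (PySem.List.pyRange 0 (dm.length : Int) 1).foldl
      (pvStepA dm idx (PySem.List.pyGetD pr idx 0) pr) ([], []) = HL
  obtain ⟨H, L⟩ := HL
  rw [PySem.List.foldl_append_singleton_eq_map]
  simp only [pvEncode, List.nil_append, List.length_map,
    show (fun (x : Int × Int) => x.2) = Prod.snd from rfl]
  rw [pvTwoMin_eq_sorted]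
  rcases H with _ | ⟨h0, _ | ⟨h1, ht⟩⟩
  · -- H = [] : no higher-priority node, up to two smallest lower distances
    rw [if_pos (by norm_num), if_neg (by norm_num), if_neg (by norm_num)]
    have hp := PySem.List.sorted_map_key_pairwise L (fun x => x.2)
    rcases hS : PySem.List.sorted L (fun x => x.2) with _ | ⟨l0, _ | ⟨l1, t⟩⟩
    · rfl
    · have hmin : min (2 - (↑([] : List (Int × Int)).length : Int)) (↑([l0].length) : Int) = 1 := by
        simp
      rw [hmin]
      have hrange : PySem.List.pyRange 0 1 = [0] := by decide
      rw [hrange]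
      simp only [List.foldl, List.map, List.nil_append, PySem.List.pyGetD_zero_cons,
        PySem.List.max?_id_cons]
      rfl
    · rw [hS] at hp
      have hmin : min (2 - (↑([] : List (Int × Int)).length : Int)) (↑((l0 :: l1 :: t).length) : Int) = 2 := by
        simp only [List.length_cons, List.length_nil]; push_cast; omega
      rw [hmin]
      have hrange : PySem.List.pyRange 0 2 = [0, 1] := by decide
      rw [hrange]
      have h01 : (l0.2 : Int) ≤ l1.2 := (List.pairwise_cons.mp hp).1 l1.2 (by simp)
      rw [pvTwoMin_sorted _ hp]
      simp only [List.foldl, List.map, List.nil_append,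
        PySem.List.pyGetD_zero_cons]
      have h1 : PySem.List.pyGetD (l0 :: l1 :: t) 1 ((0 : Int), (0 : Int)) = l1 := by
        simp [PySem.List.pyGetD, PySem.List.pyGet?, PySem.List.pyIdx?]
      rw [h1]
      simp only [List.cons_append, List.nil_append, PySem.List.max?_id_cons, List.foldl]
      omega
  · -- H = [h0] : the one higher-priority distance plus the smallest lower distance
    rw [if_pos (by norm_num), if_neg (by norm_num), if_pos (by norm_num)]
    have hp := PySem.List.sorted_map_key_pairwise L (fun x => x.2)
    rcases hS : PySem.List.sorted L (fun x => x.2) with _ | ⟨l0, t⟩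
    · rfl
    · rw [hS] at hp
      have hmin : min (2 - (↑([h0] : List (Int × Int)).length : Int)) (↑((l0 :: t).length) : Int) = 1 := by
        simp only [List.length_cons, List.length_nil]; push_cast; omega
      rw [hmin]
      have hrange : PySem.List.pyRange 0 1 = [0] := by decide
      rw [hrange]
      rw [show (List.foldl pvTwoMin (none, none) (List.map (fun x => x.2) (l0 :: t))).1
            = some l0.2 from pvTwoMin_sorted_fst _ _ (by simpa using hp)]
      simp only [List.foldl, List.map, PySem.List.pyGetD_zero_cons,
        List.cons_append, List.nil_append, PySem.List.max?_id_cons]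
      rfl
  · -- H has at least two elements : both sides take the max of the higher distances
    rw [if_neg (by simp only [List.length_cons]; push_cast; omega),
        if_pos (by simp only [List.length_cons]; push_cast; omega)]
    rcases hM : PySem.List.max? (List.map Prod.snd (h0 :: h1 :: ht)) (fun x => x) with _ | m <;>
      simp
-- ===== VERDICT (by name: the statement is the Claim_ definition above) =====
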